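-- pv_equiv track=rewrite | github.com/jack-chaudier/mirage | endogenous_context_theory/scripts/generate_training_data.py | _build_marker_line_lookup
-- ===== SOURCE A (Python) =====
-- from typing import Any, Dict, Iterable, List, Sequence, Tuple
--
-- def _build_marker_line_lookup(context: str, markers: Sequence[str]) -> Dict[str, str]:
--     lookup: Dict[str, str] = {}
--     marker_set = [marker for marker in markers if marker]
--     for line in context.splitlines():
--         for marker in marker_set:
--             if marker in line and marker not in lookup:
--                 lookup[marker] = line
--     return lookup
-- ===== SOURCE B (Python) =====
-- def _build_marker_line_lookup(context, markers):
--     seen = set()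
--     pending = []
--     for m in markers:
--         if m and m not in seen:
--             seen.add(m)
--             pending.append(m)
--     items = []
--     for line in context.splitlines():
--         if not pending:
--             break
--         rest = []
--         for m in pending:
--             if m in line:
--                 items.append((m, line))
--             else:
--                 rest.append(m)
--         pending = rest
--     return dict(items)
-- ===== Notes on version B (the rewrite author's own statement) =====
-- stated objective: alternative
-- what changed: B keeps a shrinking worklist of still-unfound (deduplicated) markers with an early exit once all are found, collecting (marker, line) hits in order into a list turned into the dict at the end, instead of A's re-scanning every marker against every line with a dict-membership test per pair.
import Mathlib
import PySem

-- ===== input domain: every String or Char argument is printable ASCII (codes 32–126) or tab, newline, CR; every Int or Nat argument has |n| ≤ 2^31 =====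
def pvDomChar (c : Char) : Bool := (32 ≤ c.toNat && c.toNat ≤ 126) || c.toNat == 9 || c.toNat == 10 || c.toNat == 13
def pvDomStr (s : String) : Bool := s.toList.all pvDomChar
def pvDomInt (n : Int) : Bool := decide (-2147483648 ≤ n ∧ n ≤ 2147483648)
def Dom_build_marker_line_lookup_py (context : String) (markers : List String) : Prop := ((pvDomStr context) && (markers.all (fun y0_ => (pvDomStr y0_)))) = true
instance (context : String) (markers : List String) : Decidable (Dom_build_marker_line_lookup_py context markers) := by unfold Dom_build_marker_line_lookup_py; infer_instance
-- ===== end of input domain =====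

-- B replaces A's per-line scan over ALL markers (with a dict-membership test per pair) by a
-- shrinking worklist of still-unfound markers with an early exit once every marker is found;
-- found (marker, line) pairs are collected in order and turned into the dict at the end.
-- Same return value; objective: alternative.

-- ===== PORT A =====
-- inner body of A's nested loop: 'if marker in line and marker not in lookup: lookup[marker] = line'
def pvAStep (line : String) (lookup : PySem.Dict String String) (marker : String) : PySem.Dict String String :=
  if PySem.Str.isIn marker line && !(lookup.contains marker) then lookup.insert marker line else lookup

def build_marker_line_lookup_py (context : String) (markers : List String) : List (String × String) :=
  let marker_set := markers.filter (fun marker => marker != "")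
  ((PySem.Str.splitlines context).foldl
    (fun lookup line => marker_set.foldl (pvAStep line) lookup)
    PySem.Dict.empty).items

-- ===== PORT B =====
-- 'for m in markers: if m and m not in seen: seen.add(m); pending.append(m)'
def pvBDedup (markers : List String) : PySem.Set String × List String :=
  markers.foldl
    (fun sp m =>
      if m != "" && !(PySem.Set.contains sp.1 m) then (PySem.Set.add sp.1 m, sp.2 ++ [m]) else sp)
    (PySem.Set.empty, [])

-- the line loop: break when pending is empty; one pass over pending partitions it into
-- hits (appended to items) and the rest, which becomes the new pending
def pvBLoop : List String → List String → List (String × String)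
  | [], _ => []
  | line :: rest, pending =>
    if pending.isEmpty then []
    else
      let fr := pending.foldl
        (fun (fr : List (String × String) × List String) m =>
          if PySem.Str.isIn m line then (fr.1 ++ [(m, line)], fr.2) else (fr.1, fr.2 ++ [m]))
        ([], [])
      fr.1 ++ pvBLoop rest fr.2

def build_marker_line_lookup_py_alt (context : String) (markers : List String) : List (String × String) :=
  (PySem.Dict.ofList (pvBLoop (PySem.Str.splitlines context) (pvBDedup markers).2)).items

-- ===== PRECONDITION & SPEC =====
def Spec_build_marker_line_lookup_py (context : String) (markers : List String) (out : List (String × String)) : Prop := out = build_marker_line_lookup_py_alt context markers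
instance (context : String) (markers : List String) (out : List (String × String)) : Decidable (Spec_build_marker_line_lookup_py context markers out) := by unfold Spec_build_marker_line_lookup_py; infer_instance

-- ===== CLAIM (what is proved, stated in full; the proofs are below) =====
def Claim_equal_build_marker_line_lookup_py : Prop := ∀ (context : String) (markers : List String), Dom_build_marker_line_lookup_py context markers → Spec_build_marker_line_lookup_py context markers (build_marker_line_lookup_py context markers)

-- ===== LEMMAS AND PROOFS =====

-- proof-side ghost: the still-pending markers of a traversal of `t`, given the keys `K` already
-- in A's dict (first occurrences of the nonempty markers of `t` that are not in `K`, in order)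
def pvFresh : List String → List String → List String
  | [], _ => []
  | m :: t, K => if m ≠ "" ∧ m ∉ K then m :: pvFresh t (m :: K) else pvFresh t K

theorem pvFresh_congr (t : List String) : ∀ K K' : List String,
    (∀ x, x ∈ K ↔ x ∈ K') → pvFresh t K = pvFresh t K' := by
  induction t with
  | nil => intro K K' _; rfl
  | cons m t ih =>
    intro K K' h
    simp only [pvFresh, h m]
    by_cases hm : m ≠ "" ∧ m ∉ K'
    · simp only [if_pos hm]
      rw [ih (m :: K) (m :: K') (by intro x; simp [h x])]
    · simp only [if_neg hm]; exact ih K K' h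

theorem pvFresh_nodup (t : List String) : ∀ K : List String,
    (pvFresh t K).Nodup ∧ ∀ x ∈ pvFresh t K, x ∉ K ∧ x ≠ "" := by
  induction t with
  | nil => intro K; simp [pvFresh]
  | cons m t ih =>
    intro K
    simp only [pvFresh]
    by_cases hm : m ≠ "" ∧ m ∉ K
    · simp only [if_pos hm]
      obtain ⟨hnd, hmem⟩ := ih (m :: K)
      refine ⟨List.nodup_cons.2 ⟨fun hc => ((hmem m hc).1 (List.mem_cons_self ..)), hnd⟩, ?_⟩
      intro x hx
      rcases List.mem_cons.1 hx with rfl | hx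
      · exact ⟨hm.2, hm.1⟩
      · exact ⟨fun hK => (hmem x hx).1 (List.mem_cons_of_mem _ hK), (hmem x hx).2⟩
    · simp only [if_neg hm]; exact ih K

theorem pvFresh_append (t : List String) : ∀ K F : List String,
    pvFresh t (K ++ F) = (pvFresh t K).filter (fun m => decide (m ∉ F)) := by
  induction t with
  | nil => intro K F; rfl
  | cons m t ih =>
    intro K F
    by_cases hm : m ≠ "" ∧ m ∉ K
    · by_cases hF : m ∈ F
      · have : ¬ (m ≠ "" ∧ m ∉ K ++ F) := by simp [hF]
        simp only [pvFresh, if_pos hm, if_neg this, List.filter_cons, hF]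
        simp only [decide_eq_true_eq, not_true_eq_false, if_false]
        rw [pvFresh_congr t (K ++ F) ((m :: K) ++ F)
          (by intro x; simp only [List.mem_append, List.mem_cons]; constructor
              · tauto
              · rintro ((rfl | h) | h)
                · exact Or.inr hF
                · exact Or.inl h
                · exact Or.inr h)]
        exact ih (m :: K) F
      · have h2 : m ≠ "" ∧ m ∉ K ++ F := ⟨hm.1, by simp [hm.2, hF]⟩
        simp only [pvFresh, if_pos hm, if_pos h2, List.filter_cons]
        simp only [decide_eq_true_eq, hF, not_false_eq_true, if_true]
        rw [show m :: (K ++ F) = (m :: K) ++ F from rfl, ih (m :: K) F]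
    · have h2 : ¬ (m ≠ "" ∧ m ∉ K ++ F) := by
        intro ⟨h1, h2⟩; exact hm ⟨h1, fun hK => h2 (by simp [hK])⟩
      simp only [pvFresh, if_neg hm, if_neg h2]; exact ih K F

-- elements failing p may be added to the seen-set without changing the p-filtered pending list
theorem pvFresh_filter_cons (p : String → Bool) (m : String) (hm : p m = false) :
    ∀ t K, (pvFresh t (m :: K)).filter p = (pvFresh t K).filter p := by
  intro t
  induction t with
  | nil => intro K; rfl
  | cons x t ih =>
    intro K
    by_cases hx : x = m
    · subst hx
      have h1 : ¬ (x ≠ "" ∧ x ∉ x :: K) := by simp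
      simp only [pvFresh, if_neg h1]
      by_cases h2 : x ≠ "" ∧ x ∉ K
      · simp only [if_pos h2, List.filter_cons, hm]
        simp only [Bool.false_eq_true, if_false]
      · simp only [if_neg h2]; exact ih K
    · by_cases h2 : x ≠ "" ∧ x ∉ K
      · have h1 : x ≠ "" ∧ x ∉ m :: K := ⟨h2.1, by simp [hx, h2.2]⟩
        simp only [pvFresh, if_pos h1, if_pos h2, List.filter_cons]
        have : (pvFresh t (x :: m :: K)).filter p = (pvFresh t (x :: K)).filter p := by
          rw [pvFresh_congr t (x :: m :: K) (m :: x :: K) (by intro y; simp; tauto), ih (x :: K)]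
        cases hpx : p x <;> simp [this]
      · have h1 : ¬ (x ≠ "" ∧ x ∉ m :: K) := by
          intro ⟨ha, hb⟩; exact h2 ⟨ha, fun hK => hb (by simp [hK])⟩
        simp only [pvFresh, if_neg h1, if_neg h2]; exact ih K
  
-- B's per-line partition pass, in closed form
theorem pvPart (line : String) (pending : List String) : ∀ (a : List (String × String)) (b : List String),
    pending.foldl
      (fun (fr : List (String × String) × List String) m =>
        if PySem.Str.isIn m line then (fr.1 ++ [(m, line)], fr.2) else (fr.1, fr.2 ++ [m]))
      (a, b)
    = (a ++ (pending.filter (fun m => PySem.Str.isIn m line)).map (fun m => (m, line)),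
       b ++ pending.filter (fun m => !(PySem.Str.isIn m line))) := by
  induction pending with
  | nil => intro a b; simp
  | cons m t ih =>
    intro a b
    simp only [List.foldl_cons]
    cases hin : PySem.Str.isIn m line
    · have hin' : PySem.Chars.isIn m.toList line.toList = false := by simpa using hin
      rw [if_neg (by simp), ih]
      simp [hin']
    · have hin' : PySem.Chars.isIn m.toList line.toList = true := by simpa using hin
      rw [if_pos (by simp), ih]
      simp [hin']

theorem pvBLoop_eq (line : String) (rest pending : List String) (h : ¬ pending.isEmpty = true) :
    pvBLoop (line :: rest) pending
      = (pending.filter (fun m => PySem.Str.isIn m line)).map (fun m => (m, line))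
        ++ pvBLoop rest (pending.filter (fun m => !(PySem.Str.isIn m line))) := by
  simp only [pvBLoop, if_neg h, pvPart line pending [] [], List.nil_append]

-- A's inner loop over the markers appends exactly the pending markers contained in `line`
theorem pvInner (line : String) : ∀ (ms : List String) (d : PySem.Dict String String),
    (∀ m ∈ ms, m ≠ "") → d.keys.Nodup →
    ms.foldl (pvAStep line) d =
      PySem.Dict.mk (d.items ++
        ((pvFresh ms d.keys).filter (fun m => PySem.Str.isIn m line)).map (fun m => (m, line))) := by
  intro ms
  induction ms with
  | nil => intro d _ _; simp [pvFresh]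
  | cons m t ih =>
    intro d hne hnd
    have hm : m ≠ "" := hne m (List.mem_cons_self ..)
    have hnet : ∀ x ∈ t, x ≠ "" := fun x hx => hne x (List.mem_cons_of_mem _ hx)
    simp only [List.foldl_cons]
    by_cases hc : d.contains m = true
    · have hmem : m ∈ d.keys := (PySem.Dict.contains_iff_mem_keys d m).1 hc
      have hstep : pvAStep line d m = d := by
        simp only [pvAStep, hc, Bool.not_true, Bool.and_false, Bool.false_eq_true, if_false]
      have hfr : pvFresh (m :: t) d.keys = pvFresh t d.keys := by
        simp [pvFresh, hmem]
      rw [hstep, hfr]; exact ih d hnet hnd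
    · have hcf : d.contains m = false := by simpa using hc
      have hmem : m ∉ d.keys := fun h => hc ((PySem.Dict.contains_iff_mem_keys d m).2 h)
      have hfr : pvFresh (m :: t) d.keys = m :: pvFresh t (m :: d.keys) := by
        simp [pvFresh, hm, hmem]
      by_cases hin : PySem.Str.isIn m line = true
      · have hstep : pvAStep line d m = d.insert m line := by
          simp only [pvAStep, hin, hcf, Bool.not_false, Bool.true_and, if_true]
        have hkeys : (d.insert m line).keys = d.keys ++ [m] :=
          PySem.Dict.keys_insert_of_not_contains d line hcf
        have hitems : (d.insert m line).items = d.items ++ [(m, line)] :=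
          PySem.Dict.items_insert_of_not_contains d line hcf
        rw [hstep, ih (d.insert m line) hnet (PySem.Dict.nodup_keys_insert d m line hnd)]
        rw [hkeys, pvFresh_congr _ (d.keys ++ [m]) (m :: d.keys) (by intro x; simp; tauto)]
        rw [hfr, hitems]
        simp only [List.filter_cons, hin, if_true, List.map_cons, List.append_assoc,
          List.cons_append, List.nil_append]
      · have hinf : PySem.Str.isIn m line = false := by simpa using hin
        have hstep : pvAStep line d m = d := by
          simp only [pvAStep, hinf, Bool.false_and, Bool.false_eq_true, if_false]
        rw [hstep, ih d hnet hnd, hfr]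
        congr 2
        simp only [List.filter_cons, hinf, Bool.false_eq_true, if_false]
        exact congrArg (List.map (fun m => (m, line)))
          (pvFresh_filter_cons (fun x => PySem.Str.isIn x line) m hinf t d.keys).symm

theorem pvBLoop_nil_pending : ∀ lines : List String, pvBLoop lines [] = [] := by
  intro lines; cases lines <;> simp [pvBLoop]

-- A's whole loop, relative to an arbitrary starting dict
theorem pvMain (ms : List String) (hne : ∀ m ∈ ms, m ≠ "") :
    ∀ (lines : List String) (d : PySem.Dict String String), d.keys.Nodup →
    (lines.foldl (fun lookup line => ms.foldl (pvAStep line) lookup) d).items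
      = d.items ++ pvBLoop lines (pvFresh ms d.keys) := by
  intro lines
  induction lines with
  | nil => intro d _; simp [pvBLoop]
  | cons line rest ih =>
    intro d hnd
    simp only [List.foldl_cons]
    rw [pvInner line ms d hne hnd]
    set P := pvFresh ms d.keys with hP
    set hits := P.filter (fun m => PySem.Str.isIn m line) with hhits
    have hkeys1 : (PySem.Dict.mk (d.items ++ hits.map (fun m => (m, line)))).keys
        = d.keys ++ hits := by
      simp only [PySem.Dict.keys, List.map_append, List.map_map]
      rw [show ((fun (x : String × String) => x.1) ∘ fun m => (m, line)) = id from rfl, List.map_id]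
    have hPnd := pvFresh_nodup ms d.keys
    have hhitsP : ∀ x ∈ hits, x ∈ P := fun x hx => List.mem_of_mem_filter hx
    have hnd1 : (PySem.Dict.mk (d.items ++ hits.map (fun m => (m, line)))).keys.Nodup := by
      rw [hkeys1]
      refine List.Nodup.append hnd (hPnd.1.filter _) ?_
      intro x hxk hxh
      exact ((hPnd.2 x (hhitsP x hxh)).1 hxk)
    rw [ih _ hnd1]
    rw [hkeys1]
    by_cases hPe : P = []
    · have hh : hits = [] := by rw [hhits, hPe]; rfl
      rw [hh]
      simp only [List.map_nil, List.append_nil]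
      rw [← hP, hPe, pvBLoop_nil_pending, pvBLoop_nil_pending]
    · have hfr2 : pvFresh ms (d.keys ++ hits) = P.filter (fun m => !(PySem.Str.isIn m line)) := by
        rw [pvFresh_append ms d.keys hits, ← hP]
        apply List.filter_congr
        intro x hx
        have : (x ∈ hits) ↔ (PySem.Str.isIn x line = true) := by
          constructor
          · intro h; exact (List.mem_filter.1 h).2
          · intro h; exact List.mem_filter.2 ⟨hx, h⟩
        cases hi : PySem.Str.isIn x line <;> simp [this] <;> simpa using hi
      rw [hfr2]
      have hloop : pvBLoop (line :: rest) P
          = hits.map (fun m => (m, line)) ++ pvBLoop rest (P.filter (fun m => !(PySem.Str.isIn m line))) := by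
        rw [pvBLoop_eq line rest P (by simp [List.isEmpty_iff, hPe]), ← hhits]
      rw [hloop]
      simp [List.append_assoc]

-- B's dedup loop computes pvFresh (seen-set and pending list march in lockstep)
theorem pvBDedup_loop (t : List String) : ∀ (s : PySem.Set String) (p : List String),
    (t.foldl
      (fun sp m =>
        if m != "" && !(PySem.Set.contains sp.1 m) then (PySem.Set.add sp.1 m, sp.2 ++ [m]) else sp)
      (s, p)).2 = p ++ pvFresh t s := by
  induction t with
  | nil => intro s p; simp [pvFresh]
  | cons m t ih =>
    intro s p
    simp only [List.foldl_cons]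
    by_cases hc : m ≠ "" ∧ m ∉ s
    · have hcb : (m != "" && !(PySem.Set.contains s m)) = true := by
        simp [PySem.Set.contains, hc.1, hc.2, bne]
      have hadd : PySem.Set.add s m = s ++ [m] := by
        simp [PySem.Set.add, PySem.Set.contains, hc.2]
      rw [if_pos hcb, hadd, ih (s ++ [m]) (p ++ [m])]
      rw [pvFresh_congr t (s ++ [m]) (m :: s) (by intro x; simp; tauto)]
      simp [pvFresh, hc]
    · have hcb : (m != "" && !(PySem.Set.contains s m)) = false := by
        by_cases hm : m = ""
        · simp [hm]
        · have hs : m ∈ s := by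
            by_contra hns
            exact hc ⟨hm, hns⟩
          simp [PySem.Set.contains, hs]
      rw [if_neg (by rw [hcb]; simp), ih s p]
      have : pvFresh (m :: t) s = pvFresh t s := by simp [pvFresh, hc]
      rw [this]

-- the empty-marker filter is absorbed by pvFresh's own emptiness test
theorem pvFresh_filter_ne (t : List String) : ∀ K,
    pvFresh (t.filter (fun m => m != "")) K = pvFresh t K := by
  induction t with
  | nil => intro K; rfl
  | cons m t ih =>
    intro K
    by_cases hm : m = ""
    · subst hm
      simp only [List.filter_cons, bne_self_eq_false, Bool.false_eq_true, if_false]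
      rw [ih K]
      simp [pvFresh]
    · simp only [List.filter_cons, if_pos (bne_iff_ne.2 hm)]
      simp only [pvFresh, ih]

-- keys produced by B's line loop: distinct, and drawn from pending
theorem pvBLoop_keys : ∀ (lines pending : List String), pending.Nodup →
    ((pvBLoop lines pending).map Prod.fst).Nodup ∧
      ∀ x ∈ (pvBLoop lines pending).map Prod.fst, x ∈ pending := by
  intro lines
  induction lines with
  | nil => intro pending _; simp [pvBLoop]
  | cons line rest ih =>
    intro pending hnd
    by_cases hPe : pending.isEmpty
    · simp [pvBLoop, hPe]
    · rw [pvBLoop_eq line rest pending hPe]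
      simp only [List.map_append, List.map_map]
      have h1 : (pending.filter (fun m => PySem.Str.isIn m line)).map (Prod.fst ∘ fun m => (m, line))
          = pending.filter (fun m => PySem.Str.isIn m line) := by
        rw [show (Prod.fst ∘ fun m => (m, line)) = (id : String → String) from rfl, List.map_id]
      obtain ⟨ihn, ihm⟩ := ih (pending.filter (fun m => !(PySem.Str.isIn m line))) (hnd.filter _)
      rw [h1]
      constructor
      · refine List.Nodup.append (hnd.filter _) ihn ?_
        intro x hx1 hx2
        have hin : PySem.Str.isIn x line = true := (List.mem_filter.1 hx1).2
        have hnin := (List.mem_filter.1 (ihm x hx2)).2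
        rw [hin] at hnin
        simp at hnin
      · intro x hx
        rcases List.mem_append.1 hx with h | h
        · exact List.mem_of_mem_filter h
        · exact List.mem_of_mem_filter (ihm x h)

-- ===== VERDICT (by name: the statement is the Claim_ definition above) =====
theorem build_marker_line_lookup_py_spec : Claim_equal_build_marker_line_lookup_py := by
  intro context markers _
  unfold Spec_build_marker_line_lookup_py
  unfold build_marker_line_lookup_py build_marker_line_lookup_py_alt
  have hpend : (pvBDedup markers).2 = pvFresh markers [] := by
    unfold pvBDedup
    rw [pvBDedup_loop markers PySem.Set.empty []]
    rfl
  have hne : ∀ m ∈ markers.filter (fun marker => marker != ""), m ≠ "" := by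
    intro m hm
    have := (List.mem_filter.1 hm).2
    simpa [bne] using this
  have hA := pvMain (markers.filter (fun marker => marker != "")) hne
      (PySem.Str.splitlines context) PySem.Dict.empty List.nodup_nil
  have hK : (PySem.Dict.empty : PySem.Dict String String).keys = [] := rfl
  rw [hK, pvFresh_filter_ne markers []] at hA
  have hEmp : (PySem.Dict.empty : PySem.Dict String String).items = [] := rfl
  rw [hEmp] at hA
  simp only [List.nil_append] at hA
  rw [hA, hpend]
  -- dict(items) round-trip: keys are distinct, so ofList keeps the list as is
  set items := pvBLoop (PySem.Str.splitlines context) (pvFresh markers []) with hitems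
  have hnodup : (items.map Prod.fst).Nodup :=
    (pvBLoop_keys (PySem.Str.splitlines context) (pvFresh markers []) (pvFresh_nodup markers []).1).1
  have hof : (PySem.Dict.ofList items).items = items := by
    unfold PySem.Dict.ofList PySem.Dict.update
    rw [PySem.Dict.items_foldl_insert_fresh items Prod.fst Prod.snd PySem.Dict.empty
      (fun a _ => by simp [PySem.Dict.contains_empty]) hnodup]
    simp [PySem.Dict.empty]
  rw [hof]
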